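-- pv_equiv track=rewrite | github.com/kaibrach/agent-zero | api/skills.py | _build_skill_file_tree
-- ===== SOURCE A (Python) =====
-- def _build_skill_file_tree(slug: str, skill_files: list) -> str:
--     raw_paths = [
--         str(f.get("path") or "").strip().lstrip("/")
--         for f in (skill_files or [])
--         if isinstance(f, dict) and str(f.get("path") or "").strip()
--     ]
--     paths = sorted({"SKILL.md"} | set(raw_paths))
--
--     root: dict = {"dirs": {}, "files": []}
--     for path in paths:
--         parts = [p for p in path.split("/") if p]
--         node = root
--         for part in parts[:-1]:
--             if part not in node["dirs"]:
--                 node["dirs"][part] = {"dirs": {}, "files": []}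
--             node = node["dirs"][part]
--         if parts:
--             node["files"].append(parts[-1])
--
--     lines = [f"{slug}/"]
--
--     def render_node(node: dict, prefix: str = "") -> None:
--         entries: list[tuple[str, str]] = []
--         for name in sorted(node["dirs"]):
--             entries.append(("dir", name))
--         for name in sorted(node["files"]):
--             entries.append(("file", name))
--         for i, (kind, name) in enumerate(entries):
--             is_last = i == len(entries) - 1
--             connector = "└── " if is_last else "├── "
--             extension = "    " if is_last else "│   "
--             if kind == "dir":
--                 lines.append(f"{prefix}{connector}{name}/")
--                 render_node(node["dirs"][name], prefix + extension)
--             else: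
--                 lines.append(f"{prefix}{connector}{name}")
--
--     render_node(root)
--     return "\n".join(lines)
-- ===== SOURCE B (Python) =====
-- def _build_skill_file_tree(slug: str, skill_files: list) -> str:
--     # One-pass path collection into a set, then the same nested-dict tree build,
--     # rendered iteratively with an explicit work stack instead of recursion.
--     seen = {"SKILL.md"}
--     for f in (skill_files or []):
--         if isinstance(f, dict):
--             s = str(f.get("path") or "").strip()
--             if s:
--                 seen.add(s.lstrip("/"))
--     paths = sorted(seen)
--
--     root: dict = {"dirs": {}, "files": []}
--     for path in paths:
--         parts = [p for p in path.split("/") if p]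
--         node = root
--         for part in parts[:-1]:
--             if part not in node["dirs"]:
--                 node["dirs"][part] = {"dirs": {}, "files": []}
--             node = node["dirs"][part]
--         if parts:
--             node["files"].append(parts[-1])
--
--     lines = [f"{slug}/"]
--     work = [("node", root, "")]
--     while work:
--         item = work.pop()
--         if item[0] == "line":
--             lines.append(item[1])
--             continue
--         _, node, prefix = item
--         dirs = sorted(node["dirs"].items(), key=lambda kv: kv[0])
--         files = sorted(node["files"])
--         total = len(dirs) + len(files)
--         pending = []
--         for i, (name, child) in enumerate(dirs):
--             last = i == total - 1
--             pending.append(("line", prefix + ("└── " if last else "├── ") + name + "/"))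
--             pending.append(("node", child, prefix + ("    " if last else "│   ")))
--         for j, name in enumerate(files):
--             last = len(dirs) + j == total - 1
--             pending.append(("line", prefix + ("└── " if last else "├── ") + name))
--         work.extend(reversed(pending))
--     return "\n".join(lines)
-- ===== Notes on version B (the rewrite author's own statement) =====
-- stated objective: alternative
-- what changed: B collects the paths in a single pass into a set instead of a comprehension-plus-union, and renders the tree iteratively with an explicit work stack of line/node frames (pushed in reverse) instead of A's recursive render_node.
import Mathlib
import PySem

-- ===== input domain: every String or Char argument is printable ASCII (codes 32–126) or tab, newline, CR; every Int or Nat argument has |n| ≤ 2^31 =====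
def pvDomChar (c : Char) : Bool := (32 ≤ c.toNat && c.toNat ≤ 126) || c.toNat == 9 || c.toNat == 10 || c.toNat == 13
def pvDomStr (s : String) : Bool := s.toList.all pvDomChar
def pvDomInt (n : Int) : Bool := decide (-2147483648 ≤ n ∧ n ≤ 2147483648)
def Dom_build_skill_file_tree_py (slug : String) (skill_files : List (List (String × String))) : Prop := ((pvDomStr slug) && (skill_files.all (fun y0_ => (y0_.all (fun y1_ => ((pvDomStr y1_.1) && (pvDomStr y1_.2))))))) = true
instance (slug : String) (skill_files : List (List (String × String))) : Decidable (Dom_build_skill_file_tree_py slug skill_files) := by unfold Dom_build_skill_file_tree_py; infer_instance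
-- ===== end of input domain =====

-- B replaces A's recursive tree renderer by an explicit work-stack loop (and collects
-- paths in one pass into a set); same return value, objective: alternative decomposition.

-- ===== PORT A =====

-- The nested dict {"dirs": {...}, "files": [...]} is encoded as a sibling-cell list:
-- `dir name child rest` / `file name rest` cells, in insertion order (dirs looked up by
-- first match, files appended at the end) — an explicit child-list encoding of A's dicts.
inductive PTree where
  | nil : PTree
  | file (name : String) (rest : PTree) : PTree
  | dir  (name : String) (child : PTree) (rest : PTree) : PTree
deriving DecidableEq, Repr

def ptSize : PTree → Nat
  | .nil => 1
  | .file _ r => 1 + ptSize r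
  | .dir _ c r => 1 + ptSize c + ptSize r

def dirNames : PTree → List String
  | .nil => []
  | .file _ r => dirNames r
  | .dir n _ r => n :: dirNames r

def fileNames : PTree → List String
  | .nil => []
  | .file n r => n :: fileNames r
  | .dir _ _ r => fileNames r

def getDir (d : String) : PTree → Option PTree
  | .nil => none
  | .file _ r => getDir d r
  | .dir n c r => if n == d then some c else getDir d r

def addFile (f : String) : PTree → PTree
  | .nil => .file f .nil
  | .file n r => .file n (addFile f r)
  | .dir n c r => .dir n c (addFile f r)

-- str(f.get("path") or "").strip()  (both value "" and a missing key give "")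
def pathStr (f : List (String × String)) : String :=
  PySem.Str.strip ((PySem.Dict.mk f).getD "path" "")

-- s.lstrip("/") — hand port (PySem has no lstrip-with-chars): drop leading '/'; exact.
def lstripSlash (s : String) : String :=
  String.ofList (s.toList.dropWhile (fun c => c == '/'))

-- [p for p in path.split("/") if p]
def partsOf (path : String) : List String :=
  (((PySem.Chars.splitOn path.toList "/".toList).map String.ofList).filter (fun p => p != ""))

-- the inner loop 'for part in parts[:-1]: … ; node["files"].append(parts[-1])' of A,
-- as the functional update of the (shared-structure) tree the mutation performs
mutual
def insertPath (t : PTree) (parts : List String) : PTree :=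
  match parts with
  | [] => t
  | [f] => addFile f t
  | d :: rest => insDir t d rest
termination_by (parts.length, ptSize t + 1)
decreasing_by all_goals simp [ptSize] <;> omega

def insDir (t : PTree) (d : String) (rest : List String) : PTree :=
  match t with
  | .nil => .dir d (insertPath .nil rest) .nil
  | .file n r => .file n (insDir r d rest)
  | .dir n c r => if n == d then .dir n (insertPath c rest) r else .dir n c (insDir r d rest)
termination_by (rest.length + 1, ptSize t)
decreasing_by all_goals simp [ptSize] <;> omega
end

theorem getDir_size {d : String} {t c : PTree} (h : getDir d t = some c) : ptSize c < ptSize t := by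
  induction t with
  | nil => simp [getDir] at h
  | file n r ih => simp only [getDir] at h; have := ih h; simp only [ptSize]; omega
  | dir n c' r ih ihr =>
    simp only [getDir] at h
    split at h
    · cases h; simp only [ptSize]; omega
    · have := ihr h; simp only [ptSize]; omega

-- A's render_node: the recursion, with `lines` threaded as accumulator
mutual
def renderNode (t : PTree) (pre : String) (lines : List String) : List String :=
  let entries : List (String × String) :=
    (PySem.List.sorted (dirNames t) (fun x => x) false).map (fun n => ("dir", n)) ++
    (PySem.List.sorted (fileNames t) (fun x => x) false).map (fun n => ("file", n))
  goEntries t (PySem.List.len entries) pre lines (PySem.List.enumerate entries)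
termination_by (ptSize t, 1, 0)
decreasing_by apply Prod.Lex.right; apply Prod.Lex.left; omega

def goEntries (t : PTree) (total : Int) (pre : String) (lines : List String)
    (es : List (Int × (String × String))) : List String :=
  match es with
  | [] => lines
  | (i, kn) :: rest =>
    let connector := if i == total - 1 then "└── " else "├── "
    let extension := if i == total - 1 then "    " else "│   "
    if kn.1 == "dir" then
      match h : getDir kn.2 t with
      | some child =>
        goEntries t total pre
          (renderNode child (pre ++ extension) (lines ++ [pre ++ connector ++ kn.2 ++ "/"])) rest
      | none => goEntries t total pre lines rest
        -- unreachable: every rendered dir name is a key of the node (Python would raise KeyError)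
    else
      goEntries t total pre (lines ++ [pre ++ connector ++ kn.2]) rest
termination_by (ptSize t, 0, es.length)
decreasing_by
  all_goals first
    | exact Prod.Lex.left _ _ (getDir_size h)
    | (apply Prod.Lex.right; apply Prod.Lex.right; simp)
end

def build_skill_file_tree_py (slug : String) (skill_files : List (List (String × String))) : String :=
  let raw_paths := (skill_files.filter (fun f => pathStr f != "")).map (fun f => lstripSlash (pathStr f))
  let paths := PySem.List.sorted (PySem.Set.union (PySem.Set.ofList ["SKILL.md"]) raw_paths) (fun x => x) false
  let root := paths.foldl (fun t p => insertPath t (partsOf p)) PTree.nil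
  PySem.Str.join "\n" (renderNode root "" [slug ++ "/"])

-- ===== PORT B =====

-- work-stack items: ("line", s) / ("node", node, prefix)
inductive Item where
  | line (s : String) : Item
  | node (t : PTree) (pre : String) : Item
deriving Repr

def dirItems : PTree → List (String × PTree)
  | .nil => []
  | .file _ r => dirItems r
  | .dir n c r => (n, c) :: dirItems r

-- the `pending` list one popped "node" frame pushes (in processing order)
def itemsOf (t : PTree) (pre : String) : List Item :=
  let dirs := PySem.List.sorted (dirItems t) (fun kv => kv.1) false
  let files := PySem.List.sorted (fileNames t) (fun x => x) false
  let total : Int := PySem.List.len dirs + PySem.List.len files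
  let pending := (PySem.List.enumerate dirs).foldl (fun acc x =>
      acc ++ [Item.line (pre ++ (if x.1 == total - 1 then "└── " else "├── ") ++ x.2.1 ++ "/"),
              Item.node x.2.2 (pre ++ (if x.1 == total - 1 then "    " else "│   "))]) []
  (PySem.List.enumerate files).foldl (fun acc x =>
      acc ++ [Item.line (pre ++ (if PySem.List.len dirs + x.1 == total - 1 then "└── " else "├── ") ++ x.2)]) pending

def wItem : Item → Nat
  | .line _ => 1
  | .node t _ => ptSize t

def wSum (s : List Item) : Nat := (s.map wItem).sum

theorem wSum_core (u : PTree) :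
    ((dirItems u).map (fun y => 1 + ptSize y.2)).sum + (fileNames u).length < ptSize u := by
  induction u with
  | nil => simp [dirItems, fileNames, ptSize]
  | file n r ih => simp [dirItems, fileNames, ptSize] at *; omega
  | dir n c r ihc ihr => simp [dirItems, fileNames, ptSize] at *; omega

theorem sum_map_snd_enumerate {α : Type} (l : List α) (s : Int) (f : α → Nat) :
    ((PySem.List.enumerate l s).map (fun x => f x.2)).sum = (l.map f).sum := by
  have h1 : (fun (x : Int × α) => f x.2) = f ∘ (fun x => x.2) := rfl
  rw [h1, ← List.map_map, PySem.List.map_snd_enumerate]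

theorem sum_flatMap' {α : Type} (l : List α) (g : α → List Nat) :
    (List.flatMap g l).sum = (l.map (fun a => (g a).sum)).sum := by
  induction l with
  | nil => simp
  | cons a r ih => simp [List.flatMap_cons, ih]

theorem itemsOf_weight (t : PTree) (pre : String) : wSum (itemsOf t pre) < ptSize t := by
  have hcore := wSum_core t
  have hpd := (PySem.List.sorted_perm (dirItems t) (fun kv => kv.1) false).map (fun y => 1 + ptSize y.2)
  have hpdsum := hpd.sum_eq
  have hpf := (PySem.List.sorted_perm (fileNames t) (fun x => x) false).length_eq
  unfold itemsOf
  simp only [PySem.List.foldl_append_eq_flatMap, List.nil_append, wSum, List.map_append,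
    List.sum_append, List.map_flatMap, sum_flatMap']
  simp only [List.map_cons, List.map_nil, wItem, List.sum_cons, List.sum_nil]
  simp only [Nat.add_zero]
  rw [sum_map_snd_enumerate (α := String × PTree) _ _ (fun y => 1 + ptSize y.2), sum_map_snd_enumerate (α := String) _ _ (fun _ => (1 : Nat))]
  have h3 : ∀ (l : List String), (l.map (fun _ => (1 : Nat))).sum = l.length := by
    intro l; induction l with
    | nil => simp
    | cons a r ih => simp [ih]; omega
  rw [h3]
  omega

-- the `while work: item = work.pop(); …` loop (head of the list = top of the stack)
def loopB (work : List Item) (lines : List String) : List String :=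
  match work with
  | [] => lines
  | .line s :: rest => loopB rest (lines ++ [s])
  | .node t pre :: rest => loopB (itemsOf t pre ++ rest) lines
termination_by wSum work
decreasing_by
  · simp [wSum, wItem]
  · have := itemsOf_weight t pre
    simp only [wSum, wItem, List.map_append, List.sum_append, List.map_cons, List.sum_cons] at *
    omega

def build_skill_file_tree_py_alt (slug : String) (skill_files : List (List (String × String))) : String :=
  let seen := skill_files.foldl (fun s f =>
      let t := pathStr f
      if t != "" then PySem.Set.add s (lstripSlash t) else s) (PySem.Set.ofList ["SKILL.md"])
  let paths := PySem.List.sorted seen (fun x => x) false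
  let root := paths.foldl (fun t p => insertPath t (partsOf p)) PTree.nil
  PySem.Str.join "\n" (loopB [Item.node root ""] [slug ++ "/"])

-- ===== PRECONDITION & SPEC =====
def Spec_build_skill_file_tree_py (slug : String) (skill_files : List (List (String × String))) (out : String) : Prop := out = build_skill_file_tree_py_alt slug skill_files
instance (slug : String) (skill_files : List (List (String × String))) (out : String) : Decidable (Spec_build_skill_file_tree_py slug skill_files out) := by unfold Spec_build_skill_file_tree_py; infer_instance

-- ===== CLAIM (what is proved, stated in full; the proofs are below) =====
def Claim_equal_build_skill_file_tree_py : Prop := ∀ (slug : String) (skill_files : List (List (String × String))), Dom_build_skill_file_tree_py slug skill_files → Spec_build_skill_file_tree_py slug skill_files (build_skill_file_tree_py slug skill_files)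

-- ===== LEMMAS AND PROOFS =====

-- ---- the two path collections build the same sorted list ----

theorem collect_eq (l : List (List (String × String))) (s0 : PySem.Set String) :
    l.foldl (fun s f =>
      let t := pathStr f
      if t != "" then PySem.Set.add s (lstripSlash t) else s) s0
    = ((l.filter (fun f => pathStr f != "")).map (fun f => lstripSlash (pathStr f))).foldl PySem.Set.add s0 := by
  induction l generalizing s0 with
  | nil => rfl
  | cons f r ih =>
    by_cases h : (pathStr f != "") = true
    · rw [List.foldl_cons, List.filter_cons, if_pos h, if_pos h, List.map_cons, List.foldl_cons, ih]
    · rw [List.foldl_cons, List.filter_cons, if_neg h, if_neg h, ih]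

-- ---- well-formedness: distinct dir names at every level (true of the built tree) ----

def WFsub : PTree → Prop
  | .nil => True
  | .file _ r => WFsub r
  | .dir _ c r => ((dirNames c).Nodup ∧ WFsub c) ∧ WFsub r

def WF (t : PTree) : Prop := (dirNames t).Nodup ∧ WFsub t

theorem dirNames_addFile (f : String) (t : PTree) : dirNames (addFile f t) = dirNames t := by
  induction t <;> simp [addFile, dirNames, *]

theorem WFsub_addFile (f : String) (t : PTree) (h : WFsub t) : WFsub (addFile f t) := by
  induction t with
  | nil => trivial
  | file n r ih => exact ih h
  | dir n c r ihc ihr => exact ⟨h.1, ihr h.2⟩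

theorem dirNames_insDir (t : PTree) (d : String) (rest : List String) :
    dirNames (insDir t d rest)
    = if d ∈ dirNames t then dirNames t else dirNames t ++ [d] := by
  induction t with
  | nil => simp [insDir, dirNames]
  | file n r ih => simpa [insDir, dirNames] using ih
  | dir n c r ihc ihr =>
    by_cases h : n = d
    · simp [insDir, dirNames, h]
    · simp only [insDir, beq_iff_eq, h, if_false, dirNames, ihr, List.mem_cons]
      have : ¬ d = n := fun hh => h hh.symm
      by_cases h2 : d ∈ dirNames r <;> simp [h2, this]

theorem wf_insDir (d : String) (rest : List String)
    (ihrec : ∀ u, (dirNames u).Nodup → WFsub u →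
      (dirNames (insertPath u rest)).Nodup ∧ WFsub (insertPath u rest)) :
    ∀ t, (dirNames t).Nodup → WFsub t →
      (dirNames (insDir t d rest)).Nodup ∧ WFsub (insDir t d rest) := by
  intro t
  induction t with
  | nil =>
    intro _ _
    have h := ihrec PTree.nil (by simp [dirNames]) trivial
    simp only [insDir]
    refine ⟨by simp [dirNames], ?_⟩
    simp only [WFsub]
    exact ⟨⟨h.1, h.2⟩, trivial⟩
  | file n r ihr =>
    intro h1 h2
    simp only [dirNames] at h1
    simp only [WFsub] at h2
    simp only [insDir, dirNames, WFsub]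
    exact ihr h1 h2
  | dir n c r ihc ihr =>
    intro h1 h2
    simp only [dirNames, List.nodup_cons] at h1
    simp only [WFsub] at h2
    by_cases hnd : n = d
    · simp only [insDir, beq_iff_eq, hnd, if_true]
      have hc := ihrec c h2.1.1 h2.1.2
      refine ⟨?_, ?_⟩
      · simp only [dirNames, List.nodup_cons]
        exact ⟨by simpa [hnd] using h1.1, h1.2⟩
      · simp only [WFsub]
        exact ⟨⟨hc.1, hc.2⟩, h2.2⟩
    · have hbe : ¬ (n == d) = true := by simp [hnd]
      simp only [insDir]
      rw [if_neg hbe]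
      have hr := ihr h1.2 h2.2
      refine ⟨?_, ?_⟩
      · simp only [dirNames, List.nodup_cons, dirNames_insDir]
        by_cases hm : d ∈ dirNames r
        · simp only [hm, if_true]
          exact ⟨h1.1, h1.2⟩
        · simp only [hm, if_false]
          refine ⟨?_, ?_⟩
          · simp only [List.mem_append, List.mem_singleton]
            rintro (ha | hb)
            · exact h1.1 ha
            · exact hnd hb
          · simp only [List.nodup_append, List.nodup_singleton]
            refine ⟨h1.2, by simp, ?_⟩
            intro a ha b hb
            rw [List.mem_singleton] at hb
            subst hb
            exact fun he => hm (he ▸ ha)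
      · simp only [WFsub]
        exact ⟨h2.1, hr.2⟩

theorem wf_insert (parts : List String) (t : PTree)
    (h1 : (dirNames t).Nodup) (h2 : WFsub t) :
    (dirNames (insertPath t parts)).Nodup ∧ WFsub (insertPath t parts) := by
  induction parts generalizing t with
  | nil => simp only [insertPath]; exact ⟨h1, h2⟩
  | cons d rest ih =>
    match rest with
    | [] =>
      simp only [insertPath, dirNames_addFile]
      exact ⟨h1, WFsub_addFile d t h2⟩
    | e :: rest' =>
      simp only [insertPath]
      exact wf_insDir d (e :: rest') (fun u hu1 hu2 => ih u hu1 hu2) t h1 h2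

theorem wf_fold (paths : List String) (t : PTree) (h : WF t) :
    WF (paths.foldl (fun t p => insertPath t (partsOf p)) t) := by
  induction paths generalizing t with
  | nil => exact h
  | cons p r ih => exact ih _ ⟨(wf_insert _ _ h.1 h.2).1, (wf_insert _ _ h.1 h.2).2⟩

theorem wf_child {t c : PTree} {n : String} (hm : (n, c) ∈ dirItems t) (h : WFsub t) : WF c := by
  induction t with
  | nil => simp [dirItems] at hm
  | file m r ih =>
    simp only [WFsub] at h
    exact ih (by simpa [dirItems] using hm) h
  | dir m c' r ihc ihr =>
    simp only [WFsub] at h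
    simp only [dirItems, List.mem_cons] at hm
    rcases hm with he | hm2
    · cases he; exact ⟨h.1.1, h.1.2⟩
    · exact ihr hm2 h.2

theorem map_fst_dirItems (t : PTree) : (dirItems t).map Prod.fst = dirNames t := by
  induction t <;> simp [dirItems, dirNames, *]

theorem getDir_of_mem_dirItems {t : PTree} {n : String} {c : PTree}
    (hnd : (dirNames t).Nodup) (hm : (n, c) ∈ dirItems t) : getDir n t = some c := by
  induction t with
  | nil => simp [dirItems] at hm
  | file m r ih =>
    simp only [dirNames] at hnd
    exact ih hnd (by simpa [dirItems] using hm)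
  | dir m c' r ihc ihr =>
    simp only [dirItems, List.mem_cons] at hm
    simp only [dirNames, List.nodup_cons] at hnd
    rcases hm with he | hm2
    · cases he; simp [getDir]
    · have hne : ¬ (m == n) = true := by
        simp only [beq_iff_eq]
        intro h; subst h
        apply hnd.1
        rw [← map_fst_dirItems]
        exact List.mem_map_of_mem hm2
      simp only [getDir, hne, if_false]
      exact ihr hnd.2 hm2

-- ---- the stack loop versus the recursive renderer ----

def pushAll : List Item → List String → List String
  | [], l => l
  | .line s :: r, l => pushAll r (l ++ [s])
  | .node t p :: r, l => pushAll r (renderNode t p l)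

theorem pushAll_append (a b : List Item) (l : List String) :
    pushAll (a ++ b) l = pushAll b (pushAll a l) := by
  induction a generalizing l with
  | nil => rfl
  | cons x r ih => cases x <;> simp [pushAll, ih]

theorem goEntries_nil (t : PTree) (T : Int) (p : String) (lines : List String) :
    goEntries t T p lines [] = lines := by
  simp [goEntries]

theorem goEntries_file (t : PTree) (T : Int) (p : String) (lines : List String)
    (i : Int) (n : String) (rest : List (Int × (String × String))) :
    goEntries t T p lines ((i, ("file", n)) :: rest)
    = goEntries t T p (lines ++ [p ++ (if i == T - 1 then "└── " else "├── ") ++ n]) rest := by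
  simp [goEntries]

theorem goEntries_dir (t : PTree) (T : Int) (p : String) (lines : List String)
    (i : Int) (n : String) (c : PTree) (rest : List (Int × (String × String)))
    (h : getDir n t = some c) :
    goEntries t T p lines ((i, ("dir", n)) :: rest)
    = goEntries t T p
        (renderNode c (p ++ (if i == T - 1 then "    " else "│   "))
          (lines ++ [p ++ (if i == T - 1 then "└── " else "├── ") ++ n ++ "/"])) rest := by
  simp [goEntries, h]
  split
  next child heq => rw [h] at heq; cases heq; rfl
  next heq => rw [h] at heq; cases heq

theorem filesPhase (t : PTree) (T : Int) (p : String) (D : Int) (fs : List String) :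
    ∀ (j : Int) (lines : List String),
    goEntries t T p lines (PySem.List.enumerate (fs.map (fun n => (("file" : String), n))) (D + j))
    = pushAll (List.flatMap
        (fun x => [Item.line (p ++ (if D + x.1 == T - 1 then "└── " else "├── ") ++ x.2)])
        (PySem.List.enumerate fs j)) lines := by
  induction fs with
  | nil => intro j lines; simp [PySem.List.enumerate_nil, goEntries_nil, pushAll]
  | cons n rest ih =>
    intro j lines
    rw [List.map_cons, PySem.List.enumerate_cons, PySem.List.enumerate_cons,
      goEntries_file, List.flatMap_cons]
    have hstep : D + j + 1 = D + (j + 1) := by ring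
    rw [hstep, ih (j + 1)]
    rfl

theorem dirsPhase (t : PTree) (T : Int) (p : String) (D : Int) (fs : List String) :
    ∀ (ds' : List (String × PTree)) (j : Int) (lines : List String),
    (∀ x ∈ ds', getDir x.1 t = some x.2) → j = D - ds'.length →
    goEntries t T p lines
      (PySem.List.enumerate (ds'.map (fun x => (("dir" : String), x.1))
        ++ fs.map (fun n => (("file" : String), n))) j)
    = pushAll
        (List.flatMap (fun x =>
            [Item.line (p ++ (if x.1 == T - 1 then "└── " else "├── ") ++ x.2.1 ++ "/"),
             Item.node x.2.2 (p ++ (if x.1 == T - 1 then "    " else "│   "))])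
          (PySem.List.enumerate ds' j)
         ++ List.flatMap
            (fun x => [Item.line (p ++ (if D + x.1 == T - 1 then "└── " else "├── ") ++ x.2)])
            (PySem.List.enumerate fs 0)) lines := by
  intro ds'
  induction ds' with
  | nil =>
    intro j lines _ hj
    have hj0 : j = D + 0 := by simpa using hj
    rw [List.map_nil, List.nil_append, PySem.List.enumerate_nil, List.flatMap_nil,
      List.nil_append, hj0, filesPhase t T p D fs 0 lines]
  | cons x r ih =>
    intro j lines hsome hj
    rw [List.map_cons, List.cons_append, PySem.List.enumerate_cons,
      goEntries_dir t T p lines j x.1 x.2 _ (hsome x (List.mem_cons_self)),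
      PySem.List.enumerate_cons, List.flatMap_cons]
    have hr : ∀ y ∈ r, getDir y.1 t = some y.2 := fun y hy => hsome y (List.mem_cons_of_mem _ hy)
    have hj' : j + 1 = D - r.length := by
      simp only [List.length_cons] at hj
      push_cast at hj ⊢
      omega
    rw [ih (j + 1) _ hr hj']
    rfl

theorem perNode (t : PTree) (p : String) (lines : List String) (hnd : (dirNames t).Nodup) :
    renderNode t p lines = pushAll (itemsOf t p) lines := by
  have hperm : ((PySem.List.sorted (dirItems t) (fun kv => kv.1) false).map Prod.fst).Perm (dirNames t) := by
    have := (PySem.List.sorted_perm (dirItems t) (fun kv => kv.1) false).map Prod.fst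
    rwa [map_fst_dirItems] at this
  have hnd2 : ((PySem.List.sorted (dirItems t) (fun kv => kv.1) false).map Prod.fst).Nodup :=
    (hperm.nodup_iff).2 hnd
  have hle : ((PySem.List.sorted (dirItems t) (fun kv => kv.1) false).map Prod.fst).Pairwise (· ≤ ·) := by
    rw [List.pairwise_map]
    exact PySem.List.sorted_pairwise (dirItems t) (fun kv => kv.1)
  have hlt : ((PySem.List.sorted (dirItems t) (fun kv => kv.1) false).map Prod.fst).Pairwise (· < ·) := by
    have hne := hnd2
    rw [List.nodup_iff_pairwise_ne] at hne
    exact (hle.and hne).imp (fun h => lt_of_le_of_ne h.1 h.2)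
  have hks : PySem.List.sorted (dirNames t) (fun x => x) false
      = (PySem.List.sorted (dirItems t) (fun kv => kv.1) false).map Prod.fst :=
    PySem.List.sorted_eq_of_perm_of_pairwise_lt _ _ _ hperm hlt
  have hsome : ∀ x ∈ PySem.List.sorted (dirItems t) (fun kv => kv.1) false, getDir x.1 t = some x.2 :=
    fun x hx => getDir_of_mem_dirItems hnd ((PySem.List.mem_sorted _ _ _ _).1 hx)
  simp only [renderNode, itemsOf, PySem.List.foldl_append_eq_flatMap, List.nil_append]
  rw [hks, List.map_map]
  have hcomp : ((fun n => (("dir" : String), n)) ∘ Prod.fst)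
      = (fun x : String × PTree => (("dir" : String), x.1)) := rfl
  rw [hcomp]
  have hT : PySem.List.len
      ((PySem.List.sorted (dirItems t) (fun kv => kv.1) false).map (fun x => (("dir" : String), x.1))
        ++ (PySem.List.sorted (fileNames t) (fun x => x) false).map (fun n => (("file" : String), n)))
      = PySem.List.len (PySem.List.sorted (dirItems t) (fun kv => kv.1) false)
        + PySem.List.len (PySem.List.sorted (fileNames t) (fun x => x) false) := by
    simp [PySem.List.len_eq]
  rw [hT]
  exact dirsPhase t _ p _ _ _ 0 lines hsome (by simp [PySem.List.len_eq])

def WFstack (s : List Item) : Prop :=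
  ∀ i ∈ s, match i with | .line _ => True | .node t _ => WF t

theorem wf_itemsOf {t : PTree} {p : String} (h : WF t) : WFstack (itemsOf t p) := by
  intro i hi
  cases i with
  | line s => trivial
  | node c q =>
    show WF c
    unfold itemsOf at hi
    simp only [PySem.List.foldl_append_eq_flatMap, List.nil_append, List.mem_append,
      List.mem_flatMap, List.mem_cons, List.mem_singleton] at hi
    rcases hi with ⟨y, hy, hgy⟩ | ⟨y, hy, hgy⟩
    · rcases hgy with h1 | h1
      · exact absurd h1 (by simp)
      · rcases h1 with h1 | h1
        · have hc : c = y.2.2 := by injection h1 with hc _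
          subst hc
          have hy2 : y.2 ∈ PySem.List.sorted (dirItems t) (fun kv => kv.1) false := by
            rcases (PySem.List.mem_enumerate_iff _ _ _).1 hy with ⟨k, hk, hyk⟩
            subst hyk
            exact List.getElem_mem hk
          have hmem : y.2 ∈ dirItems t := (PySem.List.mem_sorted _ _ _ _).1 hy2
          exact wf_child (by exact hmem) h.2
        · exact absurd h1 (by simp)
    · exact absurd hgy (by simp)

theorem loopB_eq_pushAll (s : List Item) (lines : List String) (hwf : WFstack s) :
    loopB s lines = pushAll s lines := by
  induction s, lines using loopB.induct with
  | case1 lines => simp [loopB, pushAll]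
  | case2 lines str rest ih =>
    have hr : WFstack rest := fun i hi => hwf i (List.mem_cons_of_mem _ hi)
    rw [loopB, ih hr]
    rfl
  | case3 lines t p rest ih =>
    have hwt : WF t := hwf (Item.node t p) List.mem_cons_self
    have hrest : WFstack rest := fun i hi => hwf i (List.mem_cons_of_mem _ hi)
    have hall : WFstack (itemsOf t p ++ rest) := by
      intro i hi
      rcases List.mem_append.1 hi with h1 | h2
      · exact wf_itemsOf hwt i h1
      · exact hrest i h2
    rw [loopB, ih hall, pushAll_append, ← perNode t p lines hwt.1]
    simp [pushAll]

-- ===== VERDICT (by name: the statement is the Claim_ definition above) =====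
theorem build_skill_file_tree_py_spec : Claim_equal_build_skill_file_tree_py := by
  intro slug skill_files _
  unfold Spec_build_skill_file_tree_py
  simp only [build_skill_file_tree_py, build_skill_file_tree_py_alt]
  rw [collect_eq]
  have huni : ∀ (l : List String),
      PySem.Set.union (PySem.Set.ofList ["SKILL.md"]) l
      = l.foldl PySem.Set.add (PySem.Set.ofList ["SKILL.md"]) := fun l => rfl
  rw [huni]
  generalize (PySem.List.sorted (((skill_files.filter (fun f => pathStr f != "")).map
      (fun f => lstripSlash (pathStr f))).foldl PySem.Set.add
      (PySem.Set.ofList ["SKILL.md"])) (fun x => x) false) = paths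
  generalize hroot : paths.foldl (fun t p => insertPath t (partsOf p)) PTree.nil = root
  have hwf : WF root := hroot ▸ wf_fold paths PTree.nil ⟨by simp [dirNames], trivial⟩
  have hstack : WFstack [Item.node root ""] := by
    intro i hi
    simp only [List.mem_singleton] at hi
    subst hi
    exact hwf
  rw [loopB_eq_pushAll _ _ hstack]
  simp [pushAll]
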